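-- pv_equiv track=rewrite | github.com/wyk18703232953/myResearch | codeComplex/data/filteredData/python/linear/python_linear_0080.py | solve
-- ===== SOURCE A (Python) =====
-- def solve(a_str, b_str):
--     a = list(map(int, a_str.strip()))
--     b = list(map(int, b_str.strip()))
--     dff = len(b) - len(a)
--     if dff < 0:
--         return 0
--     lb = len(b)
--     c = [0] * (lb + 1)
--     for i in range(lb):
--         c[i + 1] = c[i] + b[i]
--     ans = 0
--     for i in range(len(a)):
--         item = a[i]
--         seg_sum = c[dff + i + 1] - c[i]
--         if item:
--             ans += (dff + 1 - seg_sum)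
--
--         else:
--             ans += seg_sum
--     return ans
-- ===== SOURCE B (Python) =====
-- def solve(a_str, b_str):
--     a = list(map(int, a_str.strip()))
--     b = list(map(int, b_str.strip()))
--     dff = len(b) - len(a)
--     total = 0
--     for s in range(dff + 1):
--         for i in range(len(a)):
--             total += (1 - b[i + s]) if a[i] else b[i + s]
--     return total
-- ===== Notes on version B (the rewrite author's own statement) =====
-- stated objective: simpler
-- what changed: Replaced A's prefix-sum table with O(1) window lookups by a direct nested scan over every alignment shift, accumulating the per-position mismatch contribution; the dff<0 guard disappears because range(dff+1) is then empty.
import Mathlib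
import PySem

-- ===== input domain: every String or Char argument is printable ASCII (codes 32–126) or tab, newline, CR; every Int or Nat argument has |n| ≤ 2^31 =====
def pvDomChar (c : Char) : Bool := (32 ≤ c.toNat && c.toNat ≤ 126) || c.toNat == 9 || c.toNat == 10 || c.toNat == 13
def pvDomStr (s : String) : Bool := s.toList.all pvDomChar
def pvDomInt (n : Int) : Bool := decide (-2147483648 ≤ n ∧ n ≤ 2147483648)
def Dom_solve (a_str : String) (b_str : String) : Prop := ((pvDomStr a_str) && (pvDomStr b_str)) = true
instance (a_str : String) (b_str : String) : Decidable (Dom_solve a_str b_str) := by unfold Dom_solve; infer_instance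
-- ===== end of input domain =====

-- B replaces A's prefix-sum table (O(1) window sums) by a plain nested scan over each
-- alignment shift; same parsing, same value (objective: simpler).

-- ===== PORT A =====
-- int(ch) for a single digit character (Pre_solve guarantees every character is '0'..'9',
-- where this code-point arithmetic is exact; on anything else Python raises ValueError).
def pyDigit (c : Char) : Int := (c.toNat : Int) - 48

-- list(map(int, s.strip()))
def pyDigits (s : String) : List Int := (PySem.Str.strip s).toList.map pyDigit

def solve (a_str : String) (b_str : String) : Int :=
  let a := pyDigits a_str
  let b := pyDigits b_str
  let dff : Int := (b.length : Int) - (a.length : Int)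
  if dff < 0 then 0
  else
    let lb := b.length
    -- c = [0]*(lb+1); for i in range(lb): c[i+1] = c[i] + b[i]   (indices all in range)
    let c := (List.range lb).foldl
      (fun c i => c.set (i + 1) (c.getD i 0 + b.getD i 0)) (List.replicate (lb + 1) 0)
    -- for i in range(len(a)): …  (dff ≥ 0 on this branch, so dff.toNat is exact)
    (List.range a.length).foldl
      (fun ans i =>
        let item := a.getD i 0
        let seg := c.getD (dff.toNat + i + 1) 0 - c.getD i 0
        if item ≠ 0 then ans + ((dff + 1) - seg) else ans + seg) 0

-- ===== PORT B =====
def solve_alt (a_str : String) (b_str : String) : Int :=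
  let a := pyDigits a_str
  let b := pyDigits b_str
  let dff : Int := (b.length : Int) - (a.length : Int)
  -- for s in range(dff+1): for i in range(len(a)): total += (1 - b[i+s]) if a[i] else b[i+s]
  -- (s ranges over 0..dff, so s.toNat is exact and i+s is in range for b)
  (PySem.List.pyRange 0 (dff + 1) 1).foldl
    (fun total s =>
      (List.range a.length).foldl
        (fun total i =>
          total + (if a.getD i 0 ≠ 0 then 1 - b.getD (i + s.toNat) 0 else b.getD (i + s.toNat) 0))
        total)
    0

-- ===== PRECONDITION & SPEC =====
-- Pre_ excludes exactly the inputs on which Python's int() raises ValueError: a non-digit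
-- character remaining after strip().
def Pre_solve (a_str : String) (b_str : String) : Prop :=
  (((PySem.Str.strip a_str).toList.all PySem.Chars.isdigit) &&
   ((PySem.Str.strip b_str).toList.all PySem.Chars.isdigit)) = true
instance (a_str : String) (b_str : String) : Decidable (Pre_solve a_str b_str) := by
  unfold Pre_solve; infer_instance

def pvWitness_solve : String × String := ("10", "1101")

def Spec_solve (a_str : String) (b_str : String) (out : Int) : Prop := out = solve_alt a_str b_str
instance (a_str : String) (b_str : String) (out : Int) : Decidable (Spec_solve a_str b_str out) := by
  unfold Spec_solve; infer_instance

-- ===== CLAIM (what is proved, stated in full; the proofs are below) =====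
def Claim_equal_solve : Prop := ∀ (a_str : String) (b_str : String), Dom_solve a_str b_str → Pre_solve a_str b_str → Spec_solve a_str b_str (solve a_str b_str)

-- ===== LEMMAS AND PROOFS =====

-- prefix sums of b
def pfx (b : List Int) (k : Nat) : Int := (b.take k).sum

theorem pfx_succ (b : List Int) (k : Nat) (hk : k < b.length) :
    pfx b (k + 1) = pfx b k + b.getD k 0 := by
  simp [pfx, List.sum_take_succ b k hk, List.getD, List.getElem?_eq_getElem hk]

-- the prefix-sum table built by A's first loop
theorem build_c (b : List Int) (j : Nat) (hj : j ≤ b.length) :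
    (List.range j).foldl
      (fun c i => c.set (i + 1) (c.getD i 0 + b.getD i 0)) (List.replicate (b.length + 1) 0)
    = (List.range (j + 1)).map (pfx b) ++ List.replicate (b.length - j) 0 := by
  induction j with
  | zero => simp [pfx, List.replicate_succ]
  | succ j ih =>
    have hj' : j ≤ b.length := Nat.le_of_succ_le hj
    rw [List.range_succ, List.foldl_append, ih hj']
    have hlen : ((List.range (j + 1)).map (pfx b)).length = j + 1 := by simp
    have hget : ((List.range (j + 1)).map (pfx b) ++ List.replicate (b.length - j) 0).getD j 0
        = pfx b j := by
      rw [List.getD_append _ _ _ _ (by simp)]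
      simp [List.getD]
    simp only [List.foldl_cons, List.foldl_nil, hget]
    rw [List.set_append_right _ _ (by simp)]
    have hrep : b.length - j = (b.length - (j + 1)) + 1 := by omega
    rw [hlen]
    have : (List.replicate (b.length - j) (0 : Int)).set (j + 1 - (j + 1))
        (pfx b j + b.getD j 0)
        = pfx b (j + 1) :: List.replicate (b.length - (j + 1)) 0 := by
      rw [hrep, ← pfx_succ b j (by omega)]
      simp [List.replicate_succ]
    rw [this, List.range_succ (n := j + 1), List.map_append]
    simp

-- fold of a branch-wise addition is init + sum of the branch values
theorem foldl_ite_add (P : Nat → Prop) [DecidablePred P] (u v : Nat → Int)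
    (l : List Nat) (init : Int) :
    l.foldl (fun acc i => if P i then acc + u i else acc + v i) init
    = init + (l.map (fun i => if P i then u i else v i)).sum := by
  induction l generalizing init with
  | nil => simp
  | cons x xs ih => by_cases h : P x <;> simp [h, ih, add_assoc]

theorem foldl_add' (g : Nat → Int) (l : List Nat) (init : Int) :
    l.foldl (fun acc i => acc + g i) init = init + (l.map g).sum := by
  induction l generalizing init with
  | nil => simp
  | cons x xs ih => simp [ih, add_assoc]

theorem getD_map_range' (f : Nat → Int) (n k : Nat) (hk : k < n) :
    ((List.range n).map f).getD k 0 = f k := by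
  simp [List.getD, hk]

-- window sum as a difference of prefix sums
theorem window_sum (b : List Int) (i m : Nat) (h : i + m ≤ b.length) :
    pfx b (i + m) - pfx b i = ((List.range m).map (fun s => b.getD (i + s) 0)).sum := by
  induction m with
  | zero => simp
  | succ m ih =>
    rw [List.range_succ, List.map_append, List.sum_append, ← ih (by omega),
      show i + (m + 1) = i + m + 1 by omega, pfx_succ b (i + m) (by omega)]
    simp only [List.map_cons, List.map_nil, List.sum_cons, List.sum_nil]
    omega

-- exchange the two summations
theorem sum_swap (g : Nat → Nat → Int) (n m : Nat) :
    ((List.range n).map (fun s => ((List.range m).map (fun i => g i s)).sum)).sum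
    = ((List.range m).map (fun i => ((List.range n).map (fun s => g i s)).sum)).sum := by
  induction n with
  | zero => simp
  | succ n ih =>
    rw [List.range_succ (n := n), List.map_append, List.sum_append, ih]
    rw [show (List.range m).map (fun i => ((List.range n ++ [n]).map fun s => g i s).sum)
        = (List.range m).map (fun i => ((List.range n).map fun s => g i s).sum + g i n) by
      simp]
    induction (List.range m) with
    | nil => simp
    | cons x xs ih2 => simp at ih2 ⊢; omega

-- sum of (1 - w s) over range n
theorem sum_one_sub (w : Nat → Int) (n : Nat) :
    ((List.range n).map (fun s => 1 - w s)).sum = (n : Int) - ((List.range n).map w).sum := by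
  induction n with
  | zero => simp
  | succ n ih => rw [List.range_succ]; simp [ih]; ring

-- the core identity, over the parsed digit lists
theorem core (a b : List Int) (hle : a.length ≤ b.length) :
    List.foldl
      (fun ans i =>
        if a.getD i 0 ≠ 0 then
          ans + ((b.length : Int) - (a.length : Int) + 1 -
            (((List.range b.length).foldl
                (fun c i => c.set (i + 1) (c.getD i 0 + b.getD i 0))
                (List.replicate (b.length + 1) 0)).getD
                (((b.length : Int) - (a.length : Int)).toNat + i + 1) 0 -
              ((List.range b.length).foldl
                (fun c i => c.set (i + 1) (c.getD i 0 + b.getD i 0))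
                (List.replicate (b.length + 1) 0)).getD i 0))
        else
          ans + (((List.range b.length).foldl
                (fun c i => c.set (i + 1) (c.getD i 0 + b.getD i 0))
                (List.replicate (b.length + 1) 0)).getD
                (((b.length : Int) - (a.length : Int)).toNat + i + 1) 0 -
              ((List.range b.length).foldl
                (fun c i => c.set (i + 1) (c.getD i 0 + b.getD i 0))
                (List.replicate (b.length + 1) 0)).getD i 0)) 0 (List.range a.length)
    = (PySem.List.pyRange 0 ((b.length : Int) - (a.length : Int) + 1) 1).foldl
        (fun total s =>
          (List.range a.length).foldl
            (fun total i =>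
              total + (if a.getD i 0 ≠ 0 then 1 - b.getD (i + s.toNat) 0
                       else b.getD (i + s.toNat) 0)) total) 0 := by
  have hbuild := build_c b b.length le_rfl
  simp only [Nat.sub_self, List.replicate_zero, List.append_nil] at hbuild
  rw [hbuild]
  have hcast : ((b.length : Int) - (a.length : Int)) = ((b.length - a.length : Nat) : Int) := by
    omega
  rw [hcast]
  set d := b.length - a.length with hdd
  have hlb : b.length = a.length + d := by omega
  simp only [Int.toNat_natCast]
  rw [foldl_ite_add (fun i => a.getD i 0 ≠ 0)
        (fun i => (d : Int) + 1 -
          (((List.range (b.length + 1)).map (pfx b)).getD (d + i + 1) 0 -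
           ((List.range (b.length + 1)).map (pfx b)).getD i 0))
        (fun i => ((List.range (b.length + 1)).map (pfx b)).getD (d + i + 1) 0 -
           ((List.range (b.length + 1)).map (pfx b)).getD i 0), zero_add]
  have hL : (List.range a.length).map
        (fun i => if a.getD i 0 ≠ 0 then
          (d : Int) + 1 -
            (((List.range (b.length + 1)).map (pfx b)).getD (d + i + 1) 0 -
             ((List.range (b.length + 1)).map (pfx b)).getD i 0)
          else ((List.range (b.length + 1)).map (pfx b)).getD (d + i + 1) 0 -
             ((List.range (b.length + 1)).map (pfx b)).getD i 0)
      = (List.range a.length).map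
        (fun i => if a.getD i 0 ≠ 0 then
            (d : Int) + 1 - ((List.range (d + 1)).map (fun s => b.getD (i + s) 0)).sum
          else ((List.range (d + 1)).map (fun s => b.getD (i + s) 0)).sum) := by
    apply List.map_congr_left
    intro i hi
    have hi' : i < a.length := List.mem_range.mp hi
    rw [getD_map_range' (pfx b) _ _ (by omega), getD_map_range' (pfx b) _ _ (by omega),
      show d + i + 1 = i + (d + 1) by omega, window_sum b i (d + 1) (by omega)]
  rw [hL]
  -- now the B side
  rw [PySem.List.pyRange_one, sub_zero, show ((d : Int) + 1).toNat = d + 1 by omega,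
    List.foldl_map]
  have hfun : (fun (total : Int) (k : Nat) =>
        List.foldl (fun total i =>
          total + (if a.getD i 0 ≠ 0 then 1 - b.getD (i + ((0 : Int) + (k : Int)).toNat) 0
                   else b.getD (i + ((0 : Int) + (k : Int)).toNat) 0)) total (List.range a.length))
      = (fun (total : Int) (k : Nat) =>
        total + ((List.range a.length).map
          (fun i => if a.getD i 0 ≠ 0 then 1 - b.getD (i + k) 0 else b.getD (i + k) 0)).sum) := by
    funext total k
    simp only [zero_add, Int.toNat_natCast]
    exact foldl_add' _ _ _
  rw [hfun, foldl_add' (fun k => ((List.range a.length).map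
      (fun i => if a.getD i 0 ≠ 0 then 1 - b.getD (i + k) 0 else b.getD (i + k) 0)).sum)
      (List.range (d + 1)) 0, zero_add,
    sum_swap (fun i s => if a.getD i 0 ≠ 0 then 1 - b.getD (i + s) 0 else b.getD (i + s) 0)]
  apply congrArg
  apply List.map_congr_left
  intro i hi
  rcases eq_or_ne (a.getD i 0) 0 with h | h
  · have hc : ¬ (a.getD i 0 ≠ 0) := not_not_intro h
    simp only [if_neg hc]
  · simp only [if_pos h, sum_one_sub (fun s => b.getD (i + s) 0) (d + 1)]
    push_cast
    ring

-- ===== VERDICT (by name: the statement is the Claim_ definition above) =====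
theorem solve_spec : Claim_equal_solve := by
  intro a_str b_str _ _
  unfold Spec_solve
  simp only [solve, solve_alt]
  set a := pyDigits a_str with ha
  set b := pyDigits b_str with hb
  clear ha hb
  by_cases hd : ((b.length : Int) - (a.length : Int)) < 0
  · rw [if_pos hd, PySem.List.pyRange_one_eq_nil (by omega)]
    simp
  · rw [if_neg hd]
    exact core a b (by omega)
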